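-- pv_equiv track=rewrite | github.com/TZ2024/discrete_math | pages/6_Chapter_6_Relations.py | compose_relations
-- ===== SOURCE A (Python) =====
-- def compose_relations(R, S):
--     R_set, S_set = set(R), set(S)
--     result = set()
--     R_out = {}
--     for (a, b) in R_set: R_out.setdefault(a, set()).add(b)
--     S_out = {}
--     for (b, c) in S_set: S_out.setdefault(b, set()).add(c)
--     for a, bs in R_out.items():
--         for b in bs:
--             for c in S_out.get(b, set()): result.add((a, c))
--     return sorted(list(result))
-- ===== SOURCE B (Python) =====
-- def compose_relations(R, S):
--     # Direct nested scan over the deduplicated pairs, no index dicts.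
--     result = set()
--     for (a, b) in set(R):
--         for (b2, c) in set(S):
--             if b == b2:
--                 result.add((a, c))
--     return sorted(result)
-- ===== Notes on version B (the rewrite author's own statement) =====
-- stated objective: simpler
-- what changed: Replaced the build-two-index-dicts-then-join strategy (group R by first component, S by first component, then walk the dict items) by a direct double loop over the deduplicated pairs of R and S that matches middle elements on the fly.
import Mathlib
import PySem

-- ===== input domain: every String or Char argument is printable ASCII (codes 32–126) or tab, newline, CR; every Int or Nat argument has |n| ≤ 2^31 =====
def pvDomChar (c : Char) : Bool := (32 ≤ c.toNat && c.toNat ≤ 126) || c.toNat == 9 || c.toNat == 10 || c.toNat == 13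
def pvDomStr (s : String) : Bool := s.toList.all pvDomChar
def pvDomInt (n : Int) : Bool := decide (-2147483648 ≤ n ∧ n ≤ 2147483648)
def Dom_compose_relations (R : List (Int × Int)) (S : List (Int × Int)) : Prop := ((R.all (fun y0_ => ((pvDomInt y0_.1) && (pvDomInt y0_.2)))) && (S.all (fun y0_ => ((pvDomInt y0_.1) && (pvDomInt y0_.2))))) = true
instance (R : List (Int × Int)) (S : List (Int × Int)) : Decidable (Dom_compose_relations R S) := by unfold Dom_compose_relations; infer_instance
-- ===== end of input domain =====

-- B drops A's two index dicts and joins by a direct double scan; both end in sorted(result) so only the set matters.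

-- ===== PORT A =====
-- 'R_out.setdefault(a, set()).add(b)' mutates the set stored under a: exactly d.modify a ∅ (·.add b).
-- The final 'sorted(list(result))' sorts pairs lexicographically: PySem.List.sorted2 with the two projections.
def compose_relations (R : List (Int × Int)) (S : List (Int × Int)) : List (Int × Int) :=
  let R_set : PySem.Set (Int × Int) := PySem.Set.ofList R
  let S_set : PySem.Set (Int × Int) := PySem.Set.ofList S
  let R_out : PySem.Dict Int (PySem.Set Int) :=
    R_set.foldl (fun d p => d.modify p.1 PySem.Set.empty (fun s => PySem.Set.add s p.2)) PySem.Dict.empty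
  let S_out : PySem.Dict Int (PySem.Set Int) :=
    S_set.foldl (fun d p => d.modify p.1 PySem.Set.empty (fun s => PySem.Set.add s p.2)) PySem.Dict.empty
  let result : PySem.Set (Int × Int) :=
    R_out.items.foldl (fun res e =>
      e.2.foldl (fun res b =>
        (S_out.getD b PySem.Set.empty).foldl (fun res c => PySem.Set.add res (e.1, c)) res) res)
      PySem.Set.empty
  PySem.List.sorted2 result Prod.fst Prod.snd

-- ===== PORT B =====
def compose_relations_alt (R : List (Int × Int)) (S : List (Int × Int)) : List (Int × Int) :=
  let result : PySem.Set (Int × Int) :=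
    (PySem.Set.ofList R).foldl (fun res p =>
      (PySem.Set.ofList S).foldl (fun res q =>
        if p.2 == q.1 then PySem.Set.add res (p.1, q.2) else res) res)
      PySem.Set.empty
  PySem.List.sorted2 result Prod.fst Prod.snd

-- ===== PRECONDITION & SPEC =====
def Spec_compose_relations (R : List (Int × Int)) (S : List (Int × Int)) (out : List (Int × Int)) : Prop := out = compose_relations_alt R S
instance (R : List (Int × Int)) (S : List (Int × Int)) (out : List (Int × Int)) : Decidable (Spec_compose_relations R S out) := by unfold Spec_compose_relations; infer_instance

-- ===== CLAIM (what is proved, stated in full; the proofs are below) =====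
def Claim_equal_compose_relations : Prop := ∀ (R : List (Int × Int)) (S : List (Int × Int)), Dom_compose_relations R S → Spec_compose_relations R S (compose_relations R S)

-- ===== LEMMAS AND PROOFS =====

-- membership through a fold that only ever adds elements
theorem pv_mem_foldl_gen {α β : Type} (L : List β) (f : List α → β → List α) (P : β → α → Prop)
    (hf : ∀ s x p, p ∈ f s x ↔ p ∈ s ∨ P x p) :
    ∀ (s : List α) (p : α), p ∈ L.foldl f s ↔ p ∈ s ∨ ∃ x ∈ L, P x p := by
  induction L with
  | nil => simp
  | cons y L ih =>
    intro s p
    simp only [List.foldl_cons, ih, hf, List.mem_cons]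
    constructor
    · rintro ((h | h) | ⟨x, hx, hP⟩)
      · exact Or.inl h
      · exact Or.inr ⟨y, Or.inl rfl, h⟩
      · exact Or.inr ⟨x, Or.inr hx, hP⟩
    · rintro (h | ⟨x, (rfl | hx), hP⟩)
      · exact Or.inl (Or.inl h)
      · exact Or.inl (Or.inr hP)
      · exact Or.inr ⟨x, hx, hP⟩

theorem pv_nodup_foldl_gen {α β : Type} (L : List β) (f : List α → β → List α)
    (hf : ∀ s x, s.Nodup → (f s x).Nodup) :
    ∀ (s : List α), s.Nodup → (L.foldl f s).Nodup := by
  induction L with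
  | nil => exact fun s h => h
  | cons y L ih => intro s hs; exact ih _ (hf s y hs)

-- the grouping dict: membership of getD of a fold of modify-add
theorem pv_getD_group (L : List (Int × Int)) :
    ∀ (d : PySem.Dict Int (PySem.Set Int)) (a b : Int),
      b ∈ (L.foldl (fun d p => d.modify p.1 PySem.Set.empty (fun s => PySem.Set.add s p.2)) d).getD a PySem.Set.empty
      ↔ b ∈ d.getD a PySem.Set.empty ∨ (a, b) ∈ L := by
  induction L with
  | nil => simp
  | cons q L ih =>
    obtain ⟨q1, q2⟩ := q
    intro d a b
    simp only [List.foldl_cons, ih, List.mem_cons, Prod.mk.injEq]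
    by_cases h : a = q1
    · subst h
      rw [PySem.Dict.getD_modify_self]
      simp only [PySem.Set.mem_add]
      constructor
      · rintro ((h | rfl) | h)
        · exact Or.inl h
        · exact Or.inr (Or.inl ⟨trivial, rfl⟩)
        · exact Or.inr (Or.inr h)
      · rintro (h | (⟨_, rfl⟩ | h))
        · exact Or.inl (Or.inl h)
        · exact Or.inl (Or.inr rfl)
        · exact Or.inr h
    · rw [PySem.Dict.getD_modify_of_ne _ _ _ h]
      constructor
      · rintro (hm | hm)
        · exact Or.inl hm
        · exact Or.inr (Or.inr hm)
      · rintro (hm | (⟨rfl, _⟩ | hm))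
        · exact Or.inl hm
        · exact absurd rfl h
        · exact Or.inr hm

theorem pv_memB (R S : List (Int × Int)) (p : Int × Int) :
    p ∈ (PySem.Set.ofList R).foldl (fun res p =>
      (PySem.Set.ofList S).foldl (fun res q =>
        if p.2 == q.1 then PySem.Set.add res (p.1, q.2) else res) res)
      PySem.Set.empty
    ↔ ∃ a b c, (a, b) ∈ R ∧ (b, c) ∈ S ∧ p = (a, c) := by
  rw [pv_mem_foldl_gen _ _ (fun x p => ∃ q ∈ S, x.2 = q.1 ∧ p = (x.1, q.2))]
  · constructor
    · rintro (h | ⟨x, hx, q, hq, heq, rfl⟩)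
      · simp [PySem.Set.empty] at h
      · exact ⟨x.1, x.2, q.2, by simpa using hx, by rw [heq]; simpa using hq, rfl⟩
    · rintro ⟨a, b, c, hR, hS, rfl⟩
      exact Or.inr ⟨(a, b), by simpa using hR, (b, c), by simpa using hS, rfl, rfl⟩
  · intro s x p
    rw [pv_mem_foldl_gen _ _ (fun q p => x.2 = q.1 ∧ p = (x.1, q.2))]
    · constructor
      · rintro (h | ⟨q, hq, hc⟩)
        · exact Or.inl h
        · exact Or.inr ⟨q, by simpa using hq, hc⟩
      · rintro (h | ⟨q, hq, hc⟩)
        · exact Or.inl h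
        · exact Or.inr ⟨q, by simpa using hq, hc⟩
    · intro s q p
      by_cases h : x.2 = q.1
      · simp only [h, beq_self_eq_true, if_true, PySem.Set.mem_add]
        constructor
        · rintro (hm | rfl)
          · exact Or.inl hm
          · exact Or.inr ⟨trivial, rfl⟩
        · rintro (hm | ⟨_, rfl⟩)
          · exact Or.inl hm
          · exact Or.inr rfl
      · simp [h]

theorem pv_items_bridge (d : PySem.Dict Int (PySem.Set Int)) (hk : d.keys.Nodup) (Q : Int → Int → Prop) :
    (∃ e ∈ d.items, ∃ b ∈ e.2, Q e.1 b) ↔ (∃ a b, b ∈ d.getD a PySem.Set.empty ∧ Q a b) := by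
  constructor
  · rintro ⟨⟨a, bs⟩, he, b, hb, hQ⟩
    refine ⟨a, b, ?_, hQ⟩
    rw [PySem.Dict.getD_of_mem_items d he hk]
    exact hb
  · rintro ⟨a, b, hb, hQ⟩
    cases hget : d.get? a with
    | none =>
      rw [PySem.Dict.getD_of_get?_eq_none d _ hget] at hb
      simp [PySem.Set.empty] at hb
    | some bs =>
      rw [PySem.Dict.getD_of_get?_eq_some d _ hget] at hb
      exact ⟨(a, bs), (PySem.Dict.get?_eq_some_iff_mem_items d a bs hk).1 hget, b, hb, hQ⟩

theorem pv_group_keys_nodup (L : List (Int × Int)) :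
    ((L.foldl (fun d q => d.modify q.1 PySem.Set.empty (fun s => PySem.Set.add s q.2)) PySem.Dict.empty)).keys.Nodup :=
  PySem.Dict.nodup_keys_foldl_modify_key L Prod.fst PySem.Set.empty
    (fun _ q s => PySem.Set.add s q.2) PySem.Dict.empty (by simp [PySem.Dict.keys, PySem.Dict.empty])

theorem pv_memA (R S : List (Int × Int)) (p : Int × Int) :
    p ∈ (((PySem.Set.ofList R).foldl (fun d q => d.modify q.1 PySem.Set.empty (fun s => PySem.Set.add s q.2)) PySem.Dict.empty).items.foldl
      (fun res e => e.2.foldl (fun res b =>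
        (((PySem.Set.ofList S).foldl (fun d q => d.modify q.1 PySem.Set.empty (fun s => PySem.Set.add s q.2)) PySem.Dict.empty).getD b PySem.Set.empty).foldl
          (fun res c => PySem.Set.add res (e.1, c)) res) res) PySem.Set.empty)
    ↔ ∃ a b c, (a, b) ∈ R ∧ (b, c) ∈ S ∧ p = (a, c) := by
  set Sd := (PySem.Set.ofList S).foldl (fun d q => d.modify q.1 PySem.Set.empty (fun s => PySem.Set.add s q.2)) PySem.Dict.empty with hSd
  set Rd := (PySem.Set.ofList R).foldl (fun d q => d.modify q.1 PySem.Set.empty (fun s => PySem.Set.add s q.2)) PySem.Dict.empty with hRd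
  have h1 : ∀ (s : List (Int × Int)) (e : Int × PySem.Set Int) (p : Int × Int),
      p ∈ e.2.foldl (fun res b => (Sd.getD b PySem.Set.empty).foldl (fun res c => PySem.Set.add res (e.1, c)) res) s
      ↔ p ∈ s ∨ ∃ b ∈ e.2, ∃ c ∈ Sd.getD b PySem.Set.empty, p = (e.1, c) :=
    fun s e p => pv_mem_foldl_gen e.2 _ (fun b p => ∃ c ∈ Sd.getD b PySem.Set.empty, p = (e.1, c))
      (fun s b p => pv_mem_foldl_gen _ _ (fun c p => p = (e.1, c))
        (fun s c p => by simp [PySem.Set.mem_add]) s p) s p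
  rw [pv_mem_foldl_gen Rd.items _ (fun (e : Int × PySem.Set Int) p => ∃ b ∈ e.2, ∃ c ∈ Sd.getD b PySem.Set.empty, p = (e.1, c)) h1]
  rw [pv_items_bridge Rd (hRd ▸ pv_group_keys_nodup (PySem.Set.ofList R)) (fun a b => ∃ c ∈ Sd.getD b PySem.Set.empty, p = (a, c))]
  rw [hRd, hSd]
  simp only [PySem.Set.empty, List.not_mem_nil, false_or]
  constructor
  · rintro ⟨a, b, hb, c, hc, rfl⟩
    rcases (pv_getD_group (PySem.Set.ofList R) PySem.Dict.empty a b).1 hb with hb' | hb'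
    · simp [PySem.Dict.getD_empty, PySem.Set.empty] at hb'
    · rcases (pv_getD_group (PySem.Set.ofList S) PySem.Dict.empty b c).1 hc with hc' | hc'
      · simp [PySem.Dict.getD_empty, PySem.Set.empty] at hc'
      · exact ⟨a, b, c, (PySem.Set.mem_ofList R (a, b)).1 hb', (PySem.Set.mem_ofList S (b, c)).1 hc', rfl⟩
  · rintro ⟨a, b, c, hR, hS, rfl⟩
    exact ⟨a, b, (pv_getD_group (PySem.Set.ofList R) PySem.Dict.empty a b).2
        (Or.inr ((PySem.Set.mem_ofList R (a, b)).2 hR)), c,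
      (pv_getD_group (PySem.Set.ofList S) PySem.Dict.empty b c).2
        (Or.inr ((PySem.Set.mem_ofList S (b, c)).2 hS)), rfl⟩

theorem pv_nodupB (R S : List (Int × Int)) :
    ((PySem.Set.ofList R).foldl (fun res p =>
      (PySem.Set.ofList S).foldl (fun res q =>
        if p.2 == q.1 then PySem.Set.add res (p.1, q.2) else res) res)
      PySem.Set.empty).Nodup := by
  refine pv_nodup_foldl_gen _ _ (fun s x hs => ?_) _ (by simp [PySem.Set.empty])
  refine pv_nodup_foldl_gen _ _ (fun s q hs => ?_) _ hs
  by_cases h : x.2 == q.1 <;> simp [h, PySem.Set.nodup_add _ _ hs, hs]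

theorem pv_nodupA (S_out : PySem.Dict Int (PySem.Set Int))
    (items : List (Int × PySem.Set Int)) :
    (items.foldl (fun res e =>
      e.2.foldl (fun res b =>
        (S_out.getD b PySem.Set.empty).foldl (fun res c => PySem.Set.add res (e.1, c)) res) res)
      PySem.Set.empty).Nodup := by
  refine pv_nodup_foldl_gen _ _ (fun s e hs => ?_) _ (by simp [PySem.Set.empty])
  refine pv_nodup_foldl_gen _ _ (fun s b hs => ?_) _ hs
  exact pv_nodup_foldl_gen _ _ (fun s c hs => PySem.Set.nodup_add _ _ hs) _ hs

-- naming the sort: sorted2 of a permutation (the final sorted(list(result)))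
theorem pv_bf_le (a b : Int × Int)
    (h : (decide (a.1 < b.1) || (!decide (b.1 < a.1) && decide (a.2 < b.2))) = true) :
    (toLex a : Int ×ₗ Int) ≤ toLex b := by
  simp only [Bool.or_eq_true, Bool.and_eq_true, Bool.not_eq_true', decide_eq_true_eq,
    decide_eq_false_iff_not] at h
  rw [Prod.Lex.le_iff]
  simp only [ofLex_toLex]
  omega

theorem pv_bf_ge (a b : Int × Int)
    (h : (decide (a.1 < b.1) || (!decide (b.1 < a.1) && decide (a.2 < b.2))) = false) :
    (toLex b : Int ×ₗ Int) ≤ toLex a := by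
  simp only [Bool.or_eq_false_iff, Bool.and_eq_false_iff, Bool.not_eq_false', decide_eq_true_eq,
    decide_eq_false_iff_not] at h
  rw [Prod.Lex.le_iff]
  simp only [ofLex_toLex]
  omega

theorem pv_insert_pw (x : Int × Int) (ys : List (Int × Int))
    (h : ys.Pairwise (fun a b => (toLex a : Int ×ₗ Int) ≤ toLex b)) :
    (PySem.List.insertBy (fun a b => decide (a.1 < b.1) || (!decide (b.1 < a.1) && decide (a.2 < b.2))) x ys).Pairwise
      (fun a b => (toLex a : Int ×ₗ Int) ≤ toLex b) := by
  induction ys with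
  | nil => simp [PySem.List.insertBy]
  | cons y ys ih =>
    rw [List.pairwise_cons] at h
    cases hbf : (decide (x.1 < y.1) || (!decide (y.1 < x.1) && decide (x.2 < y.2))) with
    | true =>
      rw [show PySem.List.insertBy (fun a b => decide (a.1 < b.1) || (!decide (b.1 < a.1) && decide (a.2 < b.2))) x (y :: ys)
            = x :: y :: ys by simp [PySem.List.insertBy, hbf]]
      refine List.pairwise_cons.2 ⟨?_, List.pairwise_cons.2 h⟩
      intro z hz
      rcases List.mem_cons.1 hz with rfl | hz
      · exact pv_bf_le _ _ hbf
      · exact le_trans (pv_bf_le _ _ hbf) (h.1 z hz)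
    | false =>
      rw [show PySem.List.insertBy (fun a b => decide (a.1 < b.1) || (!decide (b.1 < a.1) && decide (a.2 < b.2))) x (y :: ys)
            = y :: PySem.List.insertBy (fun a b => decide (a.1 < b.1) || (!decide (b.1 < a.1) && decide (a.2 < b.2))) x ys by
          simp [PySem.List.insertBy, hbf]]
      refine List.pairwise_cons.2 ⟨?_, ih h.2⟩
      intro z hz
      rcases (PySem.List.mem_insertBy _ _ _ _).1 hz with rfl | hz
      · exact pv_bf_ge _ _ hbf
      · exact h.1 z hz

theorem pv_sorted2_pw (xs : List (Int × Int)) :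
    (PySem.List.sorted2 xs Prod.fst Prod.snd).Pairwise (fun a b => (toLex a : Int ×ₗ Int) ≤ toLex b) := by
  show (xs.foldl (fun acc x => PySem.List.insertBy
      (fun a b => decide (a.1 < b.1) || (!decide (b.1 < a.1) && decide (a.2 < b.2))) x acc) []).Pairwise _
  have aux : ∀ (l : List (Int × Int)) (acc : List (Int × Int)),
      acc.Pairwise (fun a b => (toLex a : Int ×ₗ Int) ≤ toLex b) →
      (l.foldl (fun acc x => PySem.List.insertBy
        (fun a b => decide (a.1 < b.1) || (!decide (b.1 < a.1) && decide (a.2 < b.2))) x acc) acc).Pairwise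
        (fun a b => (toLex a : Int ×ₗ Int) ≤ toLex b) := by
    intro l
    induction l with
    | nil => exact fun acc h => h
    | cons x l ih => exact fun acc h => ih _ (pv_insert_pw x acc h)
  exact aux xs [] (List.Pairwise.nil)

theorem pv_sorted2_congr (l₁ l₂ : List (Int × Int)) (h : l₁.Perm l₂) :
    PySem.List.sorted2 l₁ Prod.fst Prod.snd = PySem.List.sorted2 l₂ Prod.fst Prod.snd := by
  refine PySem.List.eq_of_perm_of_pairwise_le_of_injective
    (fun p : Int × Int => (toLex p : Int ×ₗ Int)) toLex.injective
    ?_ (pv_sorted2_pw l₁) (pv_sorted2_pw l₂)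
  exact ((PySem.List.sorted2_perm l₁ Prod.fst Prod.snd false).trans h).trans
    (PySem.List.sorted2_perm l₂ Prod.fst Prod.snd false).symm

-- ===== VERDICT (by name: the statement is the Claim_ definition above) =====
theorem compose_relations_spec : Claim_equal_compose_relations := by
  intro R S _hD
  unfold Spec_compose_relations compose_relations compose_relations_alt
  exact pv_sorted2_congr _ _
    ((List.perm_ext_iff_of_nodup (pv_nodupA _ _) (pv_nodupB R S)).2
      (fun p => (pv_memA R S p).trans (pv_memB R S p).symm))
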